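-- pv_equiv track=rewrite | github.com/vladkostikov/HSP | 1.3.2.2-8_tasks/massdriver.py | massdriver
-- ===== SOURCE A (Python) =====
-- def massdriver(activate: list) -> int:
--     numbers_indexes = {}
--
--     first_repeating_element_index = None
--     for index, number in enumerate(activate):
--         if numbers_indexes.get(number) is None:
--             numbers_indexes[number] = index
--         elif first_repeating_element_index is None:
--             first_repeating_element_index = numbers_indexes[number]
--         elif first_repeating_element_index > numbers_indexes[number]:
--             first_repeating_element_index = numbers_indexes[number]
--
--     if first_repeating_element_index is None:
--         return -1
--     return first_repeating_element_index
-- ===== SOURCE B (Python) =====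
-- def massdriver(activate: list) -> int:
--     counts = {}
--     for number in activate:
--         counts[number] = counts.get(number, 0) + 1
--     for index, number in enumerate(activate):
--         if counts[number] > 1:
--             return index
--     return -1
-- ===== Notes on version B (the rewrite author's own statement) =====
-- stated objective: simpler
-- what changed: Replaces A's single pass maintaining a first-index dict plus a running minimum with a two-pass decomposition: build a frequency table, then return the first index whose value occurs more than once.
import Mathlib
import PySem

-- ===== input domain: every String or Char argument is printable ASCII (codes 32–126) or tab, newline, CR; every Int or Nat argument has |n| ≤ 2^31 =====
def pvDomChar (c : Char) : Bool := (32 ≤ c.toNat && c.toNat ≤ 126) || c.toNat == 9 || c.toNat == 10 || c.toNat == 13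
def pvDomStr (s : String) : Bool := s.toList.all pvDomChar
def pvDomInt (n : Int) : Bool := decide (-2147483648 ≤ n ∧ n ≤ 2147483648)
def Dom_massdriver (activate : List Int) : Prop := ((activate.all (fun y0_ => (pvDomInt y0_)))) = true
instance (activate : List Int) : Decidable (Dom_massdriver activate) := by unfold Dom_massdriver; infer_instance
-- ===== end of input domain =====

-- B is a simpler two-pass decomposition (count table, then first index with count > 1); same O(n) cost.

-- ===== PORT A =====
-- the 'for index, number in enumerate(activate)' loop, carrying the dict of
-- first indexes and the running minimum (None = Option.none)
def massdriverLoop (d : PySem.Dict Int Int) (r : Option Int) (i : Int) :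
    List Int → Option Int
  | [] => r
  | x :: t =>
    match d.get? x with
    | none => massdriverLoop (d.insert x i) r (i + 1) t
    | some j =>
      match r with
      | none => massdriverLoop d (some j) (i + 1) t
      | some rv =>
        if rv > j then massdriverLoop d (some j) (i + 1) t
        else massdriverLoop d (some rv) (i + 1) t

def massdriver (activate : List Int) : Int :=
  match massdriverLoop PySem.Dict.empty none 0 activate with
  | none => -1
  | some v => v

-- ===== PORT B =====
-- second pass of Source B: first index whose value has count > 1, else -1
def massdriverScan (counts : PySem.Dict Int Int) (i : Int) : List Int → Int
  | [] => -1
  | x :: t => if counts.getD x 0 > 1 then i else massdriverScan counts (i + 1) t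

def massdriver_alt (activate : List Int) : Int :=
  let counts := activate.foldl (fun d x => d.insert x (d.getD x 0 + 1)) PySem.Dict.empty
  massdriverScan counts 0 activate

-- ===== PRECONDITION & SPEC =====
def Spec_massdriver (activate : List Int) (out : Int) : Prop := out = massdriver_alt activate
instance (activate : List Int) (out : Int) : Decidable (Spec_massdriver activate out) := by unfold Spec_massdriver; infer_instance

-- ===== CLAIM (what is proved, stated in full; the proofs are below) =====
def Claim_equal_massdriver : Prop := ∀ (activate : List Int), Dom_massdriver activate → Spec_massdriver activate (massdriver activate)

-- ===== LEMMAS AND PROOFS =====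

-- first (0-based) position in l whose element satisfies p, offset by i
def fdup (p : Int → Bool) : List Int → Nat → Option Nat
  | [], _ => none
  | y :: t, i => if p y then some i else fdup p t (i + 1)

lemma fdup_lower {p : Int → Bool} : ∀ {l : List Int} {i k : Nat},
    fdup p l i = some k → i ≤ k := by
  intro l
  induction l with
  | nil => intro i k h; simp [fdup] at h
  | cons y t ih =>
    intro i k h
    simp only [fdup] at h
    split at h
    · injection h with h; omega
    · exact Nat.le_of_succ_le (ih h)

lemma fdup_congr {p q : Int → Bool} : ∀ (l : List Int) (i : Nat),
    (∀ y ∈ l, p y = q y) → fdup p l i = fdup q l i := by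
  intro l
  induction l with
  | nil => intro i h; rfl
  | cons y t ih =>
    intro i h
    simp only [fdup, h y (by simp)]
    split
    · rfl
    · exact ih _ (fun z hz => h z (by simp [hz]))

lemma fdup_append {p : Int → Bool} : ∀ (as bs : List Int) (i : Nat),
    fdup p (as ++ bs) i =
      match fdup p as i with
      | some k => some k
      | none => fdup p bs (i + as.length) := by
  intro as
  induction as with
  | nil => intro bs i; simp [fdup]
  | cons y t ih =>
    intro bs i
    simp only [List.cons_append, fdup]
    split
    · rfl
    · rw [ih]; simp only [List.length_cons]; ring_nf

lemma fdup_or {p : Int → Bool} {x : Int} : ∀ (l : List Int), x ∈ l → ∀ (i : Nat),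
    fdup (fun y => p y || (y == x)) l i =
      some (match fdup p l i with
            | none => i + l.idxOf x
            | some rv => min rv (i + l.idxOf x)) := by
  intro l
  induction l with
  | nil => intro h; simp at h
  | cons y t ih =>
    intro hmem i
    by_cases hyx : y = x
    · subst hyx
      simp only [fdup, List.idxOf_cons_self, beq_self_eq_true, Bool.or_true, if_true]
      by_cases hp : p y = true
      · rw [if_pos hp]
        have h1 : min i (i + 0) = i := by omega
        show some i = some (min i (i + 0))
        rw [h1]
      · rw [if_neg hp]
        cases ht : fdup p t (i + 1) with
        | none =>
          show some i = some (i + 0)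
          rw [Nat.add_zero]
        | some rv =>
          have hlow := fdup_lower ht
          have h1 : min rv (i + 0) = i := by omega
          show some i = some (min rv (i + 0))
          rw [h1]
    · have hxt : x ∈ t := by
        rcases List.mem_cons.mp hmem with h | h
        · exact absurd h.symm hyx
        · exact h
      have hidx : List.idxOf x (y :: t) = List.idxOf x t + 1 := by simp [hyx]
      have hbeq : (y == x) = false := beq_eq_false_iff_ne.mpr hyx
      simp only [fdup, hbeq, Bool.or_false, hidx]
      by_cases hp : p y = true
      · rw [if_pos hp, if_pos hp]
        have h1 : min i (i + (List.idxOf x t + 1)) = i := by omega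
        show some i = some (min i (i + (List.idxOf x t + 1)))
        rw [h1]
      · rw [if_neg hp, if_neg hp, ih hxt (i + 1)]
        have h1 : i + (List.idxOf x t + 1) = i + 1 + List.idxOf x t := by omega
        rw [h1]

lemma count_append_singleton (pre : List Int) (x y : Int) :
    (pre ++ [x]).count y = pre.count y + (if y = x then 1 else 0) := by
  simp [List.count_append, List.count_singleton]
  split <;> simp_all [eq_comm]

-- the mathematical spec both ports compute: first index holding a duplicated value
def M (l : List Int) : Option Nat := fdup (fun y => decide (2 ≤ l.count y)) l 0

lemma M_append_not_mem {pre : List Int} {x : Int} (hx : x ∉ pre) :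
    M (pre ++ [x]) = M pre := by
  unfold M
  have hcount0 : pre.count x = 0 := List.count_eq_zero.mpr hx
  have hcongr : ∀ y ∈ pre,
      (decide (2 ≤ (pre ++ [x]).count y)) = (decide (2 ≤ pre.count y)) := by
    intro y hy
    have hne : y ≠ x := fun h => hx (h ▸ hy)
    rw [count_append_singleton, if_neg hne]
    simp
  rw [fdup_append, fdup_congr _ _ hcongr]
  have hlast : fdup (fun y => decide (2 ≤ (pre ++ [x]).count y)) [x] (0 + pre.length) = none := by
    have : (pre ++ [x]).count x = 1 := by
      rw [count_append_singleton, hcount0, if_pos rfl]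
    simp [fdup, this]
  rw [hlast]
  cases fdup (fun y => decide (2 ≤ pre.count y)) pre 0 <;> rfl

lemma M_append_mem {pre : List Int} {x : Int} (hx : x ∈ pre) :
    M (pre ++ [x]) =
      some (match M pre with
            | none => pre.idxOf x
            | some rv => min rv (pre.idxOf x)) := by
  unfold M
  have hcongr : ∀ y ∈ pre,
      (decide (2 ≤ (pre ++ [x]).count y))
        = ((decide (2 ≤ pre.count y)) || (y == x)) := by
    intro y hy
    by_cases hyx : y = x
    · subst hyx
      have h1 : 0 < pre.count y := List.count_pos_iff.mpr hx
      rw [count_append_singleton, if_pos rfl]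
      simp; omega
    · rw [count_append_singleton, if_neg hyx]
      simp [beq_eq_false_iff_ne.mpr hyx]
  rw [fdup_append, fdup_congr _ _ hcongr, fdup_or pre hx 0]
  cases fdup (fun y => decide (2 ≤ pre.count y)) pre 0 <;> simp

-- Option Nat → Option Int, the bridge between the Nat-valued spec M and A's Int state
def oInt : Option Nat → Option Int
  | none => none
  | some n => some ((n : Int))

lemma oInt_none : oInt none = none := rfl
lemma oInt_some (n : Nat) : oInt (some n) = some ((n : Int)) := rfl

-- the loop invariant for A
lemma massdriverLoop_spec : ∀ (xs pre : List Int) (d : PySem.Dict Int Int)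
    (hd : ∀ y, d.get? y = if y ∈ pre then some ((pre.idxOf y : Int)) else none),
    massdriverLoop d (oInt (M pre)) (pre.length : Int) xs
      = oInt (M (pre ++ xs)) := by
  intro xs
  induction xs with
  | nil => intro pre d _; simp [massdriverLoop]
  | cons x t ih =>
    intro pre d hd
    have hassoc : pre ++ x :: t = (pre ++ [x]) ++ t := by simp
    rw [hassoc]
    simp only [massdriverLoop, hd x]
    have hlen : ((pre.length : Int) + 1) = (((pre ++ [x]).length : Nat) : Int) := by
      simp [List.length_append]
    by_cases hx : x ∈ pre
    · rw [if_pos hx]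
      have hd' : ∀ y, d.get? y
          = if y ∈ pre ++ [x] then some (((pre ++ [x]).idxOf y : Int)) else none := by
        intro y
        rw [hd y]
        by_cases hy : y ∈ pre
        · rw [if_pos hy, if_pos (List.mem_append_left _ hy),
              List.idxOf_append_of_mem hy]
        · have hyx : y ≠ x := fun h => hy (h ▸ hx)
          rw [if_neg hy, if_neg (by simp [hy, hyx])]
      have hgoal := ih (pre ++ [x]) d hd'
      cases hM : M pre with
      | none =>
        simp only [M_append_mem hx, hM, oInt_some] at hgoal
        simp only [oInt_none]
        rw [hlen]
        exact hgoal
      | some rv =>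
        simp only [M_append_mem hx, hM, oInt_some] at hgoal
        simp only [oInt_some]
        rw [hlen]
        by_cases hcmp : ((rv : Int)) > ((pre.idxOf x : Int))
        · rw [if_pos hcmp]
          have hmin : min rv (pre.idxOf x) = pre.idxOf x := by omega
          rw [hmin] at hgoal
          exact hgoal
        · rw [if_neg hcmp]
          have hmin : min rv (pre.idxOf x) = rv := by omega
          rw [hmin] at hgoal
          exact hgoal
    · rw [if_neg hx]
      have hd' : ∀ y, (d.insert x (pre.length : Int)).get? y
          = if y ∈ pre ++ [x] then some (((pre ++ [x]).idxOf y : Int)) else none := by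
        intro y
        rw [PySem.Dict.get?_insert]
        by_cases hyx : y = x
        · subst hyx
          rw [if_pos rfl, if_pos (by simp), List.idxOf_append_of_notMem hx]
          simp [List.idxOf_cons_self]
        · rw [if_neg hyx, hd y]
          by_cases hy : y ∈ pre
          · rw [if_pos hy, if_pos (List.mem_append_left _ hy),
                List.idxOf_append_of_mem hy]
          · rw [if_neg hy, if_neg (by simp [hy, hyx])]
      rw [← M_append_not_mem hx, hlen]
      exact ih (pre ++ [x]) (d.insert x (pre.length : Int)) hd'

lemma scan_eq_fdup (full : List Int) : ∀ (xs : List Int) (i : Nat),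
    massdriverScan (full.foldl (fun d x => d.insert x (d.getD x 0 + 1)) PySem.Dict.empty) (i : Int) xs
      = match fdup (fun y => decide (2 ≤ full.count y)) xs i with
        | none => -1
        | some k => (k : Int) := by
  intro xs
  induction xs with
  | nil => intro i; rfl
  | cons y t ih =>
    intro i
    simp only [massdriverScan, fdup]
    rw [PySem.Dict.foldl_insert_getD_add_one_eq_counter, PySem.Dict.getD_counter]
    by_cases h : 2 ≤ full.count y
    · have h1 : ((full.count y : Int)) > 1 := by exact_mod_cast h
      simp [h1, h]
    · have h1 : ¬ ((full.count y : Int)) > 1 := by omega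
      have h2 := ih (i + 1)
      rw [PySem.Dict.foldl_insert_getD_add_one_eq_counter] at h2
      push_cast at h2
      simp [h1, h, h2]

-- ===== VERDICT (by name: the statement is the Claim_ definition above) =====
theorem massdriver_spec : Claim_equal_massdriver := by
  intro activate _
  unfold Spec_massdriver massdriver massdriver_alt
  have hA : massdriverLoop PySem.Dict.empty none 0 activate
      = oInt (M activate) :=
    massdriverLoop_spec activate [] PySem.Dict.empty
      (by intro y; simp [PySem.Dict.get?_empty])
  rw [hA]
  have hB := scan_eq_fdup activate activate 0
  simp only [Nat.cast_zero] at hB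
  rw [hB]
  unfold M
  cases fdup (fun y => decide (2 ≤ activate.count y)) activate 0 <;> rfl
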